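-- pv_equiv track=rewrite | github.com/yasufumi-nakata/Pytra | src/pytra/compiler/east_parts/core.py | _sh_make_generator_return_type
-- ===== SOURCE A (Python) =====
-- def _sh_make_generator_return_type(declared_ret: str, yield_types: list[str]) -> tuple[str, str]:
--     """yield 検出時の関数戻り型（list[...]）と要素型を決定する。"""
--     elem = "unknown"
--     if declared_ret != "" and declared_ret != "None":
--         elem = declared_ret
--     for yt in yield_types:
--         if yt in {"", "unknown", "None"}:
--             continue
--         if elem == "unknown":
--             elem = yt
--             continue
--         if elem != yt:
--             elem = "Any"
--             break
--     return "list[" + elem + "]", elem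
-- ===== SOURCE B (Python) =====
-- def _sh_make_generator_return_type(declared_ret: str, yield_types: list[str]) -> tuple[str, str]:
--     """Collect-then-classify: gather valid yield types, then decide by uniformity."""
--     valid = [yt for yt in yield_types if yt not in ("", "unknown", "None")]
--     if declared_ret not in ("", "unknown", "None"):
--         elem = declared_ret if all(v == declared_ret for v in valid) else "Any"
--     elif not valid:
--         elem = "unknown"
--     else:
--         elem = valid[0] if all(v == valid[0] for v in valid) else "Any"
--     return "list[" + elem + "]", elem
-- ===== Notes on version B (the rewrite author's own statement) =====
-- stated objective: simpler
-- what changed: Replaces the stateful early-break scan over yield_types with a collect-then-classify computation: filter the valid yield types once, then pick the element type by uniformity checks (all equal to declared_ret / all equal to the first valid type).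
import Mathlib
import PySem

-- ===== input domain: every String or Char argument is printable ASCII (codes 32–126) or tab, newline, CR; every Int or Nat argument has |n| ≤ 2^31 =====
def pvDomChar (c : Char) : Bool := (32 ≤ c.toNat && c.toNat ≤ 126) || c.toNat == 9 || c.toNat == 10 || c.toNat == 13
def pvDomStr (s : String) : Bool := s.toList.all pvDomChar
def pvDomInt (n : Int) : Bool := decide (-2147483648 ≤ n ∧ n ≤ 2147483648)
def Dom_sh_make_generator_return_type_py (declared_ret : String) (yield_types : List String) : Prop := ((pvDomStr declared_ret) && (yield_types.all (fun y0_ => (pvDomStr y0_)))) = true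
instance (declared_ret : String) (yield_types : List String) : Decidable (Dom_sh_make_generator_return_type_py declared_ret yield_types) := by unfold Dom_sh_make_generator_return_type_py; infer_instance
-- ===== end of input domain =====

-- B replaces A's stateful early-break scan with collect-then-classify (filter valid yield types, then uniformity checks); objective: simpler.


-- ===== PORT A =====
-- Port of A: the stateful scan; the for-loop with break becomes a structural recursion.
def shLoopA (elem : String) (l : List String) : String :=
  match l with
  | [] => elem
  | yt :: rest =>
    if yt = "" ∨ yt = "unknown" ∨ yt = "None" then shLoopA elem rest
    else if elem = "unknown" then shLoopA yt rest
    else if elem ≠ yt then "Any"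
    else shLoopA elem rest

def sh_make_generator_return_type_py (declared_ret : String) (yield_types : List String) : String × String :=
  let elem0 := if declared_ret ≠ "" ∧ declared_ret ≠ "None" then declared_ret else "unknown"
  let elem := shLoopA elem0 yield_types
  ("list[" ++ elem ++ "]", elem)

-- ===== PORT B =====
-- Port of B: collect the valid yield types once, then classify by uniformity.
def shValidB (yt : String) : Bool := !(yt == "" || yt == "unknown" || yt == "None")

def sh_make_generator_return_type_py_alt (declared_ret : String) (yield_types : List String) : String × String :=
  let valid := yield_types.filter shValidB
  let elem :=
    if shValidB declared_ret then
      (if valid.all (· == declared_ret) then declared_ret else "Any")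
    else
      match valid with
      | [] => "unknown"
      | v :: _ => if valid.all (· == v) then v else "Any"
  ("list[" ++ elem ++ "]", elem)

-- ===== PRECONDITION & SPEC =====
def Spec_sh_make_generator_return_type_py (declared_ret : String) (yield_types : List String) (out : String × String) : Prop := out = sh_make_generator_return_type_py_alt declared_ret yield_types
instance (declared_ret : String) (yield_types : List String) (out : String × String) : Decidable (Spec_sh_make_generator_return_type_py declared_ret yield_types out) := by unfold Spec_sh_make_generator_return_type_py; infer_instance

-- ===== CLAIM (what is proved, stated in full; the proofs are below) =====
def Claim_equal_sh_make_generator_return_type_py : Prop := ∀ (declared_ret : String) (yield_types : List String), Dom_sh_make_generator_return_type_py declared_ret yield_types → Spec_sh_make_generator_return_type_py declared_ret yield_types (sh_make_generator_return_type_py declared_ret yield_types)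

-- ===== LEMMAS AND PROOFS =====

-- The scan starting from a known (non-"unknown") element equals a uniformity check.
theorem shLoopA_known (e : String) (he : e ≠ "unknown") (l : List String) :
    shLoopA e l = (if (l.filter shValidB).all (· == e) then e else "Any") := by
  induction l with
  | nil => simp [shLoopA]
  | cons yt rest ih =>
    by_cases hv : yt = "" ∨ yt = "unknown" ∨ yt = "None"
    · have : shValidB yt = false := by
        unfold shValidB
        rcases hv with h | h | h <;> simp [h]
      simp [shLoopA, hv, List.filter_cons, this, ih]
    · have hvb : shValidB yt = true := by
        unfold shValidB
        push_neg at hv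
        simp [hv.1, hv.2.1, hv.2.2]
      by_cases heq : e = yt
      · subst heq
        simp [shLoopA, hv, he, List.filter_cons, hvb, ih]
      · have : (yt == e) = false := by simp [beq_iff_eq]; exact fun h => heq h.symm
        simp [shLoopA, hv, he, heq, List.filter_cons, hvb, this]

-- The scan starting from "unknown" picks the first valid type, then scans from it.
theorem shLoopA_unknown (l : List String) :
    shLoopA "unknown" l =
      (match l.filter shValidB with
       | [] => "unknown"
       | v :: _ => if (l.filter shValidB).all (· == v) then v else "Any") := by
  induction l with
  | nil => simp [shLoopA]
  | cons yt rest ih =>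
    by_cases hv : yt = "" ∨ yt = "unknown" ∨ yt = "None"
    · have : shValidB yt = false := by
        unfold shValidB
        rcases hv with h | h | h <;> simp [h]
      simp [shLoopA, hv, List.filter_cons, this, ih]
    · have hvb : shValidB yt = true := by
        unfold shValidB
        push_neg at hv
        simp [hv.1, hv.2.1, hv.2.2]
      have hne : yt ≠ "unknown" := by push_neg at hv; exact hv.2.1
      simp [shLoopA, hv, List.filter_cons, hvb, shLoopA_known yt hne rest, beq_iff_eq]

-- ===== VERDICT (by name: the statement is the Claim_ definition above) =====
theorem sh_make_generator_return_type_py_spec : Claim_equal_sh_make_generator_return_type_py := by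
  intro d ys _
  unfold Spec_sh_make_generator_return_type_py
  unfold sh_make_generator_return_type_py sh_make_generator_return_type_py_alt
  by_cases h1 : d = ""
  · subst h1
    have hf : shValidB "" = false := by decide
    simp [shLoopA_unknown ys, hf]
  · by_cases h2 : d = "None"
    · subst h2
      have hf : shValidB "None" = false := by decide
      simp [h1, shLoopA_unknown ys, hf]
    · by_cases h3 : d = "unknown"
      · subst h3
        have hf : shValidB "unknown" = false := by decide
        simp [h1, h2, shLoopA_unknown ys, hf]
      · have hvb : shValidB d = true := by simp [shValidB, h1, h2, h3]
        have h0 : (if d ≠ "" ∧ d ≠ "None" then d else "unknown") = d := by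
          simp [h1, h2]
        simp only [h0, hvb, if_true, shLoopA_known d h3 ys]
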